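-- pv_equiv track=rewrite | github.com/daohuei/ucsc-nlp-unicorn | nlp_201/hw3/starter_code.py | get_tagged_sentences
-- ===== SOURCE A (Python) =====
-- def get_tagged_sentences(text):
--     sentences = []
--
--     blocks = text.split("======================================")
--     for block in blocks:
--         sents = block.split("\n\n")
--         for sent in sents:
--             sent = sent.replace("\n", "").replace("[", "").replace("]", "")
--             if sent is not "":
--                 sentences.append(sent)
--     return sentences
-- ===== SOURCE B (Python) =====
-- def get_tagged_sentences(text):
--     # One left-to-right scan that splits on EITHER delimiter (38 '='s or a blank
--     # line), then a single cleaning/filtering pass over the fragments.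
--     eq = "=" * 38
--     frags = []
--     cur = []
--     i, n = 0, len(text)
--     while i < n:
--         if text.startswith(eq, i):
--             frags.append("".join(cur))
--             cur = []
--             i += 38
--         elif text.startswith("\n\n", i):
--             frags.append("".join(cur))
--             cur = []
--             i += 2
--         else:
--             cur.append(text[i])
--             i += 1
--     frags.append("".join(cur))
--     table = str.maketrans("", "", "\n[]")
--     sentences = []
--     for frag in frags:
--         frag = frag.translate(table)
--         if frag != "":
--             sentences.append(frag)
--     return sentences
-- ===== Notes on version B (the rewrite author's own statement) =====
-- stated objective: alternative
-- what changed: A splits the text into blocks on the 38-equals delimiter and then splits each block on blank lines in a nested loop; B makes one left-to-right scan that splits on either delimiter as it is met, then cleans and filters the flat fragment list in a single pass.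
import Mathlib
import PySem

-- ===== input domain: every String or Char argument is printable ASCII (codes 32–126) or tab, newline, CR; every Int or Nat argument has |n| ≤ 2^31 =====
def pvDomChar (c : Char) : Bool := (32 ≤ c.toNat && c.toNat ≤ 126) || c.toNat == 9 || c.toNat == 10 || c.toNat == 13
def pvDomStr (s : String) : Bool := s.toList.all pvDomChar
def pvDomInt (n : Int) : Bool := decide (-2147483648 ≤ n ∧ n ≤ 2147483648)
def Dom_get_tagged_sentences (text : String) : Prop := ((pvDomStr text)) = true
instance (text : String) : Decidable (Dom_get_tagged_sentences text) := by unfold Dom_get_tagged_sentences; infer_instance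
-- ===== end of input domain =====

-- B replaces A's nested block-then-sentence splitting by ONE left-to-right scan that
-- splits on either delimiter, then a single cleaning pass (objective: alternative).

-- ===== PORT A =====
-- A's per-sentence cleaning: .replace("\n", "").replace("[", "").replace("]", "")
def pvCleanA (sent : List Char) : List Char :=
  PySem.Chars.replace (PySem.Chars.replace (PySem.Chars.replace sent ['\n'] []) ['['] []) [']'] []

def get_tagged_sentences (text : String) : List String :=
  -- the delimiter literal "======================================" (38 '='s)
  let blocks := PySem.Chars.splitOn text.toList (List.replicate 38 '=')
  let sentences : List (List Char) :=
    blocks.foldl (fun sentences block =>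
      let sents := PySem.Chars.splitOn block ['\n', '\n']
      sents.foldl (fun sentences sent =>
        let sent := pvCleanA sent
        -- `if sent is not ""` in CPython: the cleaned result is the interned
        -- empty string exactly when it is empty, so this is `sent ≠ ""`
        if sent ≠ [] then sentences ++ [sent] else sentences) sentences) []
  sentences.map String.ofList

-- ===== PORT B =====
-- the 38-equals-signs delimiter (eq = "=" * 38 in Source B)
def pvEq38 : List Char := List.replicate 38 '='

-- Source B's while-loop over index i with text.startswith(delim, i), ported as structural
-- recursion on the remaining character list (exact: `l` is text[i:], `cur` the chars
-- collected for the current fragment).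
def pvScan (l cur : List Char) : List (List Char) :=
  match l with
  | [] => [cur]
  | c :: rest =>
    if pvEq38.isPrefixOf (c :: rest) then cur :: pvScan ((c :: rest).drop 38) []
    else if ['\n', '\n'].isPrefixOf (c :: rest) then cur :: pvScan ((c :: rest).drop 2) []
    else pvScan rest (cur ++ [c])
termination_by l.length
decreasing_by
  · have := (List.isPrefixOf_iff_prefix.mp (by assumption)).length_le
    simp only [pvEq38, List.length_replicate, List.length_drop, List.length_cons] at this ⊢
    omega
  · simp
  · simp

-- Source B's frag.translate(str.maketrans("", "", "\n[]")): delete '\n', '[' and ']'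
def pvCleanB (frag : List Char) : List Char :=
  frag.filter (fun c => !(c == '\n' || c == '[' || c == ']'))

def get_tagged_sentences_alt (text : String) : List String :=
  let frags := pvScan text.toList []
  let sentences : List (List Char) :=
    frags.foldl (fun sentences frag =>
      let frag := pvCleanB frag
      if frag ≠ [] then sentences ++ [frag] else sentences) []
  sentences.map String.ofList

-- ===== PRECONDITION & SPEC =====
def Spec_get_tagged_sentences (text : String) (out : List String) : Prop := out = get_tagged_sentences_alt text
instance (text : String) (out : List String) : Decidable (Spec_get_tagged_sentences text out) := by unfold Spec_get_tagged_sentences; infer_instance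

-- ===== CLAIM (what is proved, stated in full; the proofs are below) =====
def Claim_equal_get_tagged_sentences : Prop := ∀ (text : String), Dom_get_tagged_sentences text → Spec_get_tagged_sentences text (get_tagged_sentences text)

-- ===== LEMMAS AND PROOFS =====

-- accumulator-free reference version of PySem.Chars.splitOn (nonempty separator c0 :: sep')
def mySplit (c0 : Char) (sep' : List Char) (l : List Char) : List (List Char) :=
  match l with
  | [] => [[]]
  | c :: rest =>
    if (c0 :: sep').isPrefixOf (c :: rest) then
      [] :: mySplit c0 sep' ((c :: rest).drop (c0 :: sep').length)
    else
      (mySplit c0 sep' rest).modifyHead (c :: ·)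
termination_by l.length
decreasing_by
  · have := (List.isPrefixOf_iff_prefix.mp (by assumption)).length_le
    simp only [List.length_drop, List.length_cons] at this ⊢
    omega
  · simp

lemma mySplit_ne_nil (c0 : Char) (sep' : List Char) (l : List Char) : mySplit c0 sep' l ≠ [] := by
  induction l using mySplit.induct c0 sep' with
  | case1 => simp [mySplit]
  | case2 c rest hpre ih =>
    rw [mySplit.eq_def]; simp only [hpre, if_true]; simp
  | case3 c rest hpre ih =>
    rw [mySplit.eq_def]; simp only [hpre]
    cases h : mySplit c0 sep' rest with
    | nil => exact absurd h ih
    | cons b bs => simp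

lemma splitOn_go_eq (c0 : Char) (sep' : List Char) :
    ∀ (fuel : Nat) (l cur : List Char) (acc : List (List Char)), l.length ≤ fuel →
    PySem.Chars.splitOn.go (c0 :: sep') fuel l cur acc
      = acc.reverse ++ (mySplit c0 sep' l).modifyHead (cur.reverse ++ ·) := by
  intro fuel
  induction fuel with
  | zero =>
    intro l cur acc h
    have : l = [] := by cases l <;> simp_all
    subst this
    simp [PySem.Chars.splitOn.go, mySplit]
  | succ n ih =>
    intro l cur acc h
    match l with
    | [] => simp [PySem.Chars.splitOn.go, mySplit]
    | c :: rest =>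
      rw [PySem.Chars.splitOn.go, mySplit.eq_def]
      dsimp only
      split
      · rw [ih _ _ _ (by simp only [List.length_drop, List.length_cons] at h ⊢; omega)]
        cases hms : mySplit c0 sep' ((c :: rest).drop (c0 :: sep').length) with
        | nil => exact absurd hms (mySplit_ne_nil _ _ _)
        | cons b bs => simp
      · rw [ih _ _ _ (by simp only [List.length_cons] at h; omega)]
        cases hms : mySplit c0 sep' rest with
        | nil => exact absurd hms (mySplit_ne_nil _ _ _)
        | cons b bs => simp

lemma splitOn_eq (c0 : Char) (sep' : List Char) (l : List Char) :
    PySem.Chars.splitOn l (c0 :: sep') = mySplit c0 sep' l := by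
  rw [PySem.Chars.splitOn, splitOn_go_eq c0 sep' _ _ _ _ (by omega)]
  cases hms : mySplit c0 sep' l with
  | nil => exact absurd hms (mySplit_ne_nil _ _ _)
  | cons b bs => simp

-- replacing a single character by "" is deletion of that character
lemma replace_go_filter (a : Char) :
    ∀ (fuel : Nat) (l acc : List Char), l.length ≤ fuel →
    PySem.Chars.replace.go [a] [] fuel l acc
      = acc.reverse ++ l.filter (fun c => !(c == a)) := by
  intro fuel
  induction fuel with
  | zero =>
    intro l acc h
    have : l = [] := by cases l <;> simp_all
    subst this
    simp [PySem.Chars.replace.go]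
  | succ n ih =>
    intro l acc h
    match l with
    | [] => simp [PySem.Chars.replace.go]
    | c :: rest =>
      rw [PySem.Chars.replace.go]
      split
      · rename_i hpre
        have hca : c = a := by
          have := List.isPrefixOf_iff_prefix.mp hpre
          rcases this with ⟨t, ht⟩
          cases ht; rfl
        rw [ih _ _ (by simp only [List.length_drop, List.length_cons] at h ⊢; omega)]
        subst hca
        simp
      · rename_i hpre
        have hca : ¬ c = a := by
          intro hc; subst hc
          exact hpre (by simp [List.isPrefixOf])
        rw [ih _ _ (by simp only [List.length_cons] at h; omega)]
        simp [hca]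

lemma replace_filter (a : Char) (l : List Char) :
    PySem.Chars.replace l [a] [] = l.filter (fun c => !(c == a)) := by
  rw [PySem.Chars.replace]
  simp only [List.isEmpty_cons, if_false, Bool.false_eq_true]
  exact replace_go_filter a l.length l [] le_rfl

lemma cleanA_eq_cleanB (s : List Char) : pvCleanA s = pvCleanB s := by
  rw [pvCleanA, replace_filter, replace_filter, replace_filter, List.filter_filter,
    List.filter_filter, pvCleanB]
  apply List.filter_congr
  intro c _
  simp [Bool.not_or, Bool.and_comm, Bool.and_assoc]

-- accumulator-free reference version of pvScan
def altS (l : List Char) : List (List Char) :=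
  match l with
  | [] => [[]]
  | c :: rest =>
    if pvEq38.isPrefixOf (c :: rest) then [] :: altS ((c :: rest).drop 38)
    else if ['\n', '\n'].isPrefixOf (c :: rest) then [] :: altS ((c :: rest).drop 2)
    else (altS rest).modifyHead (c :: ·)
termination_by l.length
decreasing_by
  · have := (List.isPrefixOf_iff_prefix.mp (by assumption)).length_le
    simp only [pvEq38, List.length_replicate, List.length_drop, List.length_cons] at this ⊢
    omega
  · simp
  · simp

lemma altS_ne_nil (l : List Char) : altS l ≠ [] := by
  induction l using altS.induct with
  | case1 => simp [altS]
  | case2 c rest hpre ih => rw [altS.eq_def]; simp only [hpre, if_true]; simp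
  | case3 c rest hpre hpre2 ih => rw [altS.eq_def]; simp only [hpre, hpre2]; simp
  | case4 c rest hpre hpre2 ih =>
    rw [altS.eq_def]; simp only [hpre, hpre2]
    cases h : altS rest with
    | nil => exact absurd h ih
    | cons b bs => simp

lemma pvScan_eq (l cur : List Char) : pvScan l cur = (altS l).modifyHead (cur ++ ·) := by
  induction l using altS.induct generalizing cur with
  | case1 => simp [pvScan, altS]
  | case2 c rest hpre ih =>
    rw [pvScan.eq_def, altS.eq_def]
    simp only [hpre, if_true, ih]
    cases h : altS ((c :: rest).drop 38) with
    | nil => exact absurd h (altS_ne_nil _)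
    | cons b bs => simp
  | case3 c rest hpre hpre2 ih =>
    rw [pvScan.eq_def, altS.eq_def]
    simp only [hpre, hpre2, ih]
    cases h : altS ((c :: rest).drop 2) with
    | nil => exact absurd h (altS_ne_nil _)
    | cons b bs => simp
  | case4 c rest hpre hpre2 ih =>
    rw [pvScan.eq_def, altS.eq_def]
    simp only [hpre, hpre2, ih]
    cases h : altS rest with
    | nil => exact absurd h (altS_ne_nil _)
    | cons b bs => simp

lemma pvEq38_cons : pvEq38 = '=' :: List.replicate 37 '=' := by decide

lemma rep38_cons : List.replicate 38 '=' = '=' :: List.replicate 37 '=' := by decide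

-- the heart of the equivalence: splitting on "="*38 and then on "\n\n" inside each
-- block, flattened, is the single-scan alternation split
lemma flatMap_split_eq_altS (l : List Char) :
    (mySplit '=' (List.replicate 37 '=') l).flatMap (mySplit '\n' ['\n']) = altS l := by
  have hlen : ('=' :: List.replicate 37 '=').length = 38 := by simp
  induction l using altS.induct with
  | case1 => simp [mySplit, altS]
  | case2 c rest hpre ih =>
    have hpre' : ('=' :: List.replicate 37 '=').isPrefixOf (c :: rest) = true := by
      rw [← pvEq38_cons]; exact hpre
    rw [altS.eq_def, mySplit.eq_def]
    simp only [hpre, hpre', if_true, hlen]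
    rw [List.flatMap_cons, ih]
    simp [mySplit]
  | case3 c rest hpre hpre2 ih =>
    obtain ⟨t, ht⟩ := List.isPrefixOf_iff_prefix.mp hpre2
    obtain ⟨hc, hrest⟩ : c = '\n' ∧ rest = '\n' :: t := by cases ht; exact ⟨rfl, rfl⟩
    subst hc; subst hrest
    have hnp1 : ('=' :: List.replicate 37 '=').isPrefixOf ('\n' :: '\n' :: t) = false := by
      simp [List.isPrefixOf]
    have hnp2 : ('=' :: List.replicate 37 '=').isPrefixOf ('\n' :: t) = false := by
      simp [List.isPrefixOf]
    rw [altS.eq_def]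
    simp only [hpre, hpre2, if_true, Bool.false_eq_true, if_false]
    rw [mySplit.eq_def]
    simp only [hnp1, Bool.false_eq_true, if_false]
    rw [mySplit.eq_def]
    simp only [hnp2, Bool.false_eq_true, if_false]
    simp only [List.drop_succ_cons, List.drop_zero] at ih ⊢
    cases hms : mySplit '=' (List.replicate 37 '=') t with
    | nil => exact absurd hms (mySplit_ne_nil _ _ _)
    | cons b0 bs =>
      rw [hms] at ih
      simp only [List.modifyHead_cons, List.flatMap_cons]
      rw [mySplit.eq_def]
      have hyes : (['\n', '\n'] : List Char).isPrefixOf ('\n' :: '\n' :: b0) = true := by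
        simp [List.isPrefixOf]
      simp only [hyes, if_true]
      simp only [List.flatMap_cons] at ih
      simp only [List.length_cons, List.drop_succ_cons] at ⊢
      rw [← ih]
      simp
  | case4 c rest hpre hpre2 ih =>
    have hpre' : ('=' :: List.replicate 37 '=').isPrefixOf (c :: rest) = false := by
      rw [← pvEq38_cons]; simp [hpre]
    rw [altS.eq_def]
    simp only [hpre, hpre2, Bool.false_eq_true, if_false]
    rw [mySplit.eq_def]
    simp only [hpre', Bool.false_eq_true, if_false]
    cases hms : mySplit '=' (List.replicate 37 '=') rest with
    | nil => exact absurd hms (mySplit_ne_nil _ _ _)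
    | cons b0 bs =>
      rw [hms] at ih
      have hnp : (['\n', '\n'] : List Char).isPrefixOf (c :: b0) = false := by
        cases rest with
        | nil =>
          have hb0 : b0 = [] := by
            rw [mySplit.eq_def] at hms
            simp at hms
            exact hms.1
          subst hb0
          simp [List.isPrefixOf]
        | cons d rest2 =>
          by_cases he : ('=' :: List.replicate 37 '=').isPrefixOf (d :: rest2) = true
          · rw [mySplit.eq_def] at hms
            simp only [he] at hms
            injection hms with h1 h2
            rw [← h1]
            simp [List.isPrefixOf]
          · rw [mySplit.eq_def] at hms
            simp only [he] at hms
            cases hms2 : mySplit '=' (List.replicate 37 '=') rest2 with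
            | nil => exact absurd hms2 (mySplit_ne_nil _ _ _)
            | cons b0' bs' =>
              rw [hms2] at hms
              simp only [List.modifyHead_cons] at hms
              injection hms with h1 h2
              rw [← h1]
              simp [List.isPrefixOf] at hpre2 ⊢
              tauto
      simp only [List.modifyHead_cons, List.flatMap_cons]
      rw [mySplit.eq_def]
      simp only [hnp, Bool.false_eq_true, if_false]
      cases hs : mySplit '\n' ['\n'] b0 with
      | nil => exact absurd hs (mySplit_ne_nil _ _ _)
      | cons s0 ss =>
        rw [← ih]
        simp only [List.flatMap_cons, hs]
        simp

-- fold shapes of the two ports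
lemma fold_shape (f : List Char → List Char) (l : List (List Char)) (acc : List (List Char)) :
    l.foldl (fun sentences sent =>
      let s := f sent
      if s ≠ [] then sentences ++ [s] else sentences) acc
    = acc ++ (l.filter (fun x => !(f x).isEmpty)).map f := by
  have hfun : (fun (sentences : List (List Char)) sent =>
      let s := f sent
      if s ≠ [] then sentences ++ [s] else sentences)
      = (fun sentences sent =>
        if (fun x => !(f x).isEmpty) sent = true then sentences ++ [f sent] else sentences) := by
    funext acc x
    by_cases h : f x = [] <;> simp [h]
  rw [hfun, PySem.List.foldl_append_if]

-- ===== VERDICT (by name: the statement is the Claim_ definition above) =====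
theorem get_tagged_sentences_spec : Claim_equal_get_tagged_sentences := by
  intro text _
  unfold Spec_get_tagged_sentences get_tagged_sentences get_tagged_sentences_alt
  simp only [rep38_cons, splitOn_eq, fold_shape]
  have houter :
      (mySplit '=' (List.replicate 37 '=') text.toList).foldl
        (fun sentences block =>
          sentences ++ ((mySplit '\n' ['\n'] block).filter
              (fun x => !(pvCleanA x).isEmpty)).map pvCleanA) []
      = (mySplit '=' (List.replicate 37 '=') text.toList).flatMap
          (fun block => ((mySplit '\n' ['\n'] block).filter
              (fun x => !(pvCleanA x).isEmpty)).map pvCleanA) := by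
    rw [PySem.List.foldl_append_eq_flatMap]
    simp
  rw [houter]
  have hAB : pvCleanA = pvCleanB := funext cleanA_eq_cleanB
  rw [hAB]
  rw [pvScan_eq]
  have hmh : (altS text.toList).modifyHead (([] : List Char) ++ ·) = altS text.toList := by
    cases hA : altS text.toList <;> simp
  rw [hmh, ← flatMap_split_eq_altS]
  rw [← List.map_flatMap, ← List.filter_flatMap]
  simp
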